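-- pv_equiv track=rewrite | github.com/ChanMeng666/juejin-algorithm-practice | problems/009-supermarket-product-arrangement/solution.py | solution
-- ===== SOURCE A (Python) =====
-- def solution(n: int, m: int, s: str, c: str) -> int:
--     # Convert the product list to a list for manipulation
--     items = list(s)
--
--     # Count the quantity of products each customer wants to buy
--     customer_wants = {}
--     for char in c:
--         customer_wants[char] = customer_wants.get(char, 0) + 1
--
--     # Count the quantity of each product on the shelf
--     shelf_items = {}
--     for char in s:
--         shelf_items[char] = shelf_items.get(char, 0) + 1
--
--     # Sort products based on customer demand
--     # Prioritize products that more customers want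
--     items.sort(key=lambda x: (-customer_wants.get(x, 0), x))
--
--     # Simulate the customer purchasing process
--     sold = 0
--     used_positions = set()
--
--     for customer_item in c:
--         found = False
--         # Iterate through all positions
--         for pos in range(n):
--             if pos in used_positions:
--                 continue
--             if items[pos] == customer_item:
--                 sold += 1
--                 used_positions.add(pos)
--                 found = True
--                 break
--             # If an empty slot is encountered, the customer leaves
--             if items[pos] == ' ':
--                 break
--         # If the desired product was not found, move to the next customer
--         if not found:
--             continue
--
--     return sold
-- ===== SOURCE B (Python) =====
-- def solution(n: int, m: int, s: str, c: str) -> int: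
--     # Count each customer's demand and lay out the shelf: products sorted by
--     # demand (most wanted first, ties alphabetical), as the problem requires.
--     wants = {}
--     for ch in c:
--         wants[ch] = wants.get(ch, 0) + 1
--     shelf = sorted(s, key=lambda x: (-wants.get(x, 0), x))
--
--     # Each product occupies one contiguous block of the sorted shelf; record the
--     # block (first position, size) of every product among the first n slots.
--     first = {}
--     count = {}
--     for i in range(n):
--         ch = shelf[i]
--         first.setdefault(ch, i)
--         count[ch] = count.get(ch, 0) + 1
--
--     # Serve customers in order: a customer takes the nearest remaining copy of
--     # their product, unless a remaining empty slot comes first and stops them.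
--     taken = {}
--     sold = 0
--     for x in c:
--         if taken.get(x, 0) >= count.get(x, 0):
--             continue
--         pos = first[x] + taken.get(x, 0)
--         if taken.get(' ', 0) < count.get(' ', 0) and first[' '] + taken.get(' ', 0) < pos:
--             continue
--         taken[x] = taken.get(x, 0) + 1
--         sold += 1
--     return sold
-- ===== Notes on version B (the rewrite author's own statement) =====
-- stated objective: faster
-- what changed: Replaces A's per-customer O(n) scan over shelf positions with a used-position set by one pass over the first n slots of the demand-sorted shelf recording each product's contiguous block (first position and size), then serving each customer in O(1) from per-product taken counters; Pre_ excludes n > len(s), where A's scan can run past the shelf list and raise IndexError (on a few such inputs every customer's scan stops early and A still returns; B raises IndexError there).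
-- outside the precondition, e.g. on solution(5, 1, 'a b', 'ab'): A returns 2, B raises IndexError
import Mathlib
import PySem

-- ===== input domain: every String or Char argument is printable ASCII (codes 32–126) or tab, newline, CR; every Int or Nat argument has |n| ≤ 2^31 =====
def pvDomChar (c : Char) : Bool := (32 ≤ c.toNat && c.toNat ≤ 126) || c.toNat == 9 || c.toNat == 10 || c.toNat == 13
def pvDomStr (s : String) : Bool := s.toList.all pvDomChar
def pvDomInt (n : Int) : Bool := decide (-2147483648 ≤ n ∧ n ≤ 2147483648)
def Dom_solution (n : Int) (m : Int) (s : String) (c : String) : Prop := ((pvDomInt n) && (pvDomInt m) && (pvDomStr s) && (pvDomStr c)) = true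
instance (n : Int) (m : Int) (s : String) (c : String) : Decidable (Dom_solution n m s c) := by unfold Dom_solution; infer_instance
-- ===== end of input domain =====

-- B replaces A's per-customer O(n) scan over shelf positions with one per-product stock count
-- of the first n slots of the demand-sorted shelf and an O(1) stock decrement per customer.

-- ===== PORT A =====
-- the inner 'for pos in range(n)' loop, with its continue (used position) and its
-- break-on-empty-slot and break-on-match, as a recursion over the range list
def solScan (items : List Char) (x : Char) (used : PySem.Set Int) : List Int → Option Int
  | [] => none
  | p :: rest =>
    if PySem.Set.contains used p then solScan items x used rest
    else if PySem.List.pyGetD items p ' ' = x then some p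
    else if PySem.List.pyGetD items p ' ' = ' ' then none
    else solScan items x used rest

def solution (n : Int) (m : Int) (s : String) (c : String) : Int :=
  let items0 := s.toList
  let customer_wants : PySem.Dict Char Int :=
    c.toList.foldl (fun d ch => d.insert ch (d.getD ch 0 + 1)) PySem.Dict.empty
  let _shelf_items : PySem.Dict Char Int :=
    s.toList.foldl (fun d ch => d.insert ch (d.getD ch 0 + 1)) PySem.Dict.empty
  let items := PySem.List.sorted2 items0 (fun x => -(customer_wants.getD x 0)) (fun x => x)
  let fin := c.toList.foldl
    (fun (st : Int × PySem.Set Int) ci =>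
      match solScan items ci st.2 (PySem.List.pyRange 0 n) with
      | some p => (st.1 + 1, PySem.Set.add st.2 p)
      | none => st) ((0 : Int), PySem.Set.empty)
  fin.1

-- ===== PORT B =====
def solution_alt (n : Int) (m : Int) (s : String) (c : String) : Int :=
  let wants : PySem.Dict Char Int :=
    c.toList.foldl (fun d ch => d.insert ch (d.getD ch 0 + 1)) PySem.Dict.empty
  let shelf := PySem.List.sorted2 s.toList (fun x => -(wants.getD x 0)) (fun x => x)
  let fc := (PySem.List.pyRange 0 n).foldl
    (fun (fc : PySem.Dict Char Int × PySem.Dict Char Int) i =>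
      -- Python shelf[i]: in range for every i in range(n) under Pre_; ported as pyGetD
      let ch := PySem.List.pyGetD shelf i ' '
      (fc.1.setdefault ch i, fc.2.insert ch (fc.2.getD ch 0 + 1)))
    (PySem.Dict.empty, PySem.Dict.empty)
  let first := fc.1
  let count := fc.2
  let fin := c.toList.foldl
    (fun (st : Int × PySem.Dict Char Int) x =>
      if count.getD x 0 ≤ st.2.getD x 0 then st
      else
        -- Python first[x]: the key is present here (count.get(x, 0) > 0); ported as getD
        let pos := first.getD x 0 + st.2.getD x 0
        if st.2.getD ' ' 0 < count.getD ' ' 0 ∧ first.getD ' ' 0 + st.2.getD ' ' 0 < pos then st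
        else (st.1 + 1, st.2.insert x (st.2.getD x 0 + 1)))
    ((0 : Int), PySem.Dict.empty)
  fin.1

-- ===== PRECONDITION & SPEC =====
-- Pre_ excludes n > len(s): there A's inner scan can run past the end of the shelf list and
-- raise IndexError (on the few such inputs where every customer's scan stops early A still
-- returns, and those are excluded with it; B raises IndexError there).
def Pre_solution (n : Int) (m : Int) (s : String) (c : String) : Prop :=
  n ≤ PySem.Str.len s
instance (n : Int) (m : Int) (s : String) (c : String) : Decidable (Pre_solution n m s c) := by
  unfold Pre_solution; infer_instance
def pvWitness_solution : Int × Int × String × String := (2, 1, "ab", "ab")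
def Spec_solution (n : Int) (m : Int) (s : String) (c : String) (out : Int) : Prop := out = solution_alt n m s c
instance (n : Int) (m : Int) (s : String) (c : String) (out : Int) : Decidable (Spec_solution n m s c out) := by unfold Spec_solution; infer_instance

-- ===== CLAIM (what is proved, stated in full; the proofs are below) =====
def Claim_equal_solution : Prop := ∀ (n : Int) (m : Int) (s : String) (c : String), Dom_solution n m s c → Pre_solution n m s c → Spec_solution n m s c (solution n m s c)

-- ===== LEMMAS AND PROOFS =====

-- first index of y in t (length of t if absent) and number of copies of y
def pvS (t : List Char) (y : Char) : Nat := (t.takeWhile (fun z => z != y)).length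
def pvC (t : List Char) (y : Char) : Nat := t.count y
-- copies of y among the first n shelf slots
def pvW (n : Int) (t : List Char) (y : Char) : Nat := (t.take n.toNat).count y
-- the candidate predicate of A's inner scan: unused slot holding x or an empty slot
def pvPred (t : List Char) (x : Char) (us : PySem.Set Int) (p : Int) : Prop :=
  PySem.Set.contains us p = false ∧
    (PySem.List.pyGetD t p ' ' = x ∨ PySem.List.pyGetD t p ' ' = ' ')
-- shape of the demand-sorted shelf: equal products are contiguous blocks
def pvShape (t : List Char) : Prop :=
  (∀ (i : Nat) (hi : i < t.length) (y : Char), t[i] = y ↔ (pvS t y ≤ i ∧ i < pvS t y + pvC t y)) ∧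
  (∀ y, pvS t y + pvC t y ≤ t.length) ∧
  (∀ (y : Char) (q : Nat), q ≤ t.length → (t.take q).count y = min (pvS t y + pvC t y) q - pvS t y)

lemma pv_sorted2_eq_sorted (xs : List Char) (k1 : Char → Int) :
    PySem.List.sorted2 xs k1 (fun z => z) false =
      PySem.List.sorted xs (fun z => toLex (k1 z, z)) false := by
  rw [PySem.List.sorted_eq_foldl_insertBy]
  show List.foldl _ [] xs = _
  congr 1
  funext acc z
  congr 1
  funext a b
  have hlex : (toLex ((k1 a), a) < toLex ((k1 b), b)) ↔
      (k1 a < k1 b ∨ (k1 a = k1 b ∧ a < b)) := Prod.Lex.toLex_lt_toLex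
  rcases lt_trichotomy (k1 a) (k1 b) with h | h | h
  · simp [hlex, h, asymm h]
  · simp [Prod.Lex.toLex_lt_toLex, h]
  · simp [Prod.Lex.toLex_lt_toLex, asymm h, ne_of_gt h, h]

lemma pv_decomp (t : List Char) (K : Char → Lex (Int × Char)) (hinj : Function.Injective K)
    (hp : t.Pairwise (fun a b => K a ≤ K b)) (y : Char) (hy : y ∈ t) :
    ∃ a b : List Char, t = a ++ (List.replicate (pvC t y) y ++ b) ∧ y ∉ a ∧ y ∉ b ∧
      a.length = pvS t y := by
  induction t with
  | nil => cases hy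
  | cons z t ih =>
    obtain ⟨h1, h2⟩ := List.pairwise_cons.mp hp
    by_cases hzy : z = y
    · subst hzy
      by_cases hyt : z ∈ t
      · obtain ⟨a', b', ht', ha', hb', hlen'⟩ := ih h2 hyt
        have ha0 : a' = [] := by
          cases a' with
          | nil => rfl
          | cons w a'' =>
            exfalso
            have hwy : w ≠ z := fun h => ha' (h ▸ List.mem_cons_self)
            have hwt : w ∈ t := by
              rw [ht']; exact List.mem_append.mpr (Or.inl List.mem_cons_self)
            have hzw : K z ≤ K w := h1 w hwt
            have hcnt : 0 < pvC t z := by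
              rw [pvC]; exact List.count_pos_iff.mpr hyt
            have hzrep : z ∈ List.replicate (pvC t z) z ++ b' :=
              List.mem_append.mpr (Or.inl (List.mem_replicate.mpr ⟨by omega, rfl⟩))
            have h2' := h2
            rw [ht'] at h2'
            obtain ⟨_, _, hcross⟩ := List.pairwise_append.mp h2'
            have hwz : K w ≤ K z := hcross w List.mem_cons_self z hzrep
            exact hwy (hinj (le_antisymm hwz hzw))
        subst ha0
        refine ⟨[], b', ?_, by simp, hb', by simp [pvS]⟩
        have hcc : pvC (z :: t) z = pvC t z + 1 := by
          simp [pvC, List.count_cons_self]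
        rw [hcc, List.replicate_succ]
        simpa using ht'
      · refine ⟨[], t, ?_, by simp, hyt, by simp [pvS]⟩
        have hcc : pvC (z :: t) z = 1 := by
          simp [pvC, List.count_cons_self, List.count_eq_zero_of_not_mem hyt]
        simp [hcc]
    · have hyt : y ∈ t := by
        rcases List.mem_cons.mp hy with h | h
        · exact absurd h.symm hzy
        · exact h
      obtain ⟨a', b', ht', ha', hb', hlen'⟩ := ih h2 hyt
      have hcc : pvC (z :: t) y = pvC t y := by
        simp [pvC, List.count_cons_of_ne hzy]
      refine ⟨z :: a', b', ?_, ?_, hb', ?_⟩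
      · rw [hcc]; simpa using ht'
      · intro hmem
        rcases List.mem_cons.mp hmem with h | h
        · exact hzy h.symm
        · exact ha' h
      · have : pvS (z :: t) y = pvS t y + 1 := by
          simp [pvS, List.takeWhile_cons, bne, hzy]
        simp [this, hlen']

lemma pvS_of_not_mem (t : List Char) (y : Char) (hy : y ∉ t) : pvS t y = t.length := by
  induction t with
  | nil => rfl
  | cons a t ih =>
    have ha : a ≠ y := fun h => hy (h ▸ List.mem_cons_self)
    have ht : y ∉ t := fun h => hy (List.mem_cons_of_mem a h)
    simp [pvS, List.takeWhile_cons, bne, ha] at ih ⊢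
    exact ih ht

lemma pvShape_of_pairwise (t : List Char) (K : Char → Lex (Int × Char))
    (hinj : Function.Injective K) (hp : t.Pairwise (fun a b => K a ≤ K b)) : pvShape t := by
  refine ⟨?_, ?_, ?_⟩
  · intro i hi y
    by_cases hy : y ∈ t
    · obtain ⟨a, b, ht, hya, hyb, hal⟩ := pv_decomp t K hinj hp y hy
      have hlen := congrArg List.length ht
      simp only [List.length_append, List.length_replicate] at hlen
      rcases lt_or_ge i a.length with hlt | hge
      · have hgl : t[i] = a[i]'(by omega) := by
          rw [List.getElem_of_eq ht hi]
          exact List.getElem_append_left (by omega)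
        constructor
        · intro h
          rw [h] at hgl
          exact absurd (hgl ▸ List.getElem_mem (by omega)) hya
        · rintro ⟨hh1, hh2⟩
          omega
      · rcases lt_or_ge i (a.length + pvC t y) with hlt2 | hge2
        · have hgl : t[i] = y := by
            rw [List.getElem_of_eq ht hi]
            rw [List.getElem_append_right hge]
            rw [List.getElem_append_left (by simp only [List.length_replicate]; omega)]
            exact List.getElem_replicate _
          simp only [hgl, true_iff]
          constructor <;> omega
        · have hlb : i - a.length - pvC t y < b.length := by omega
          have hgl : t[i] = b[i - a.length - pvC t y]'hlb := by
            rw [List.getElem_of_eq ht hi]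
            rw [List.getElem_append_right hge]
            rw [List.getElem_append_right (by simp only [List.length_replicate]; omega)]
            simp only [List.length_replicate]
          constructor
          · intro h
            rw [h] at hgl
            exact absurd (hgl ▸ List.getElem_mem hlb) hyb
          · rintro ⟨hh1, hh2⟩
            omega
    · have hS := pvS_of_not_mem t y hy
      have hC : pvC t y = 0 := List.count_eq_zero_of_not_mem hy
      constructor
      · intro h
        exact absurd (h ▸ List.getElem_mem hi) hy
      · rintro ⟨hh1, hh2⟩
        omega
  · intro y
    by_cases hy : y ∈ t
    · obtain ⟨a, b, ht, hya, hyb, hal⟩ := pv_decomp t K hinj hp y hy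
      have hlen := congrArg List.length ht
      simp only [List.length_append, List.length_replicate] at hlen
      omega
    · have hS := pvS_of_not_mem t y hy
      have hC : pvC t y = 0 := List.count_eq_zero_of_not_mem hy
      omega
  · intro y q hq
    by_cases hy : y ∈ t
    · obtain ⟨a, b, ht, hya, hyb, hal⟩ := pv_decomp t K hinj hp y hy
      have h1 : (t.take q).count y = min (q - a.length) (pvC t y) := by
        conv_lhs => rw [ht]
        rw [List.take_append, List.count_append, List.take_append, List.count_append,
          List.take_replicate, List.count_replicate]
        rw [List.count_eq_zero_of_not_mem (fun h => hya (List.mem_of_mem_take h)),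
          List.count_eq_zero_of_not_mem (fun h => hyb (List.mem_of_mem_take h))]
        simp
      rw [h1]
      omega
    · have hS := pvS_of_not_mem t y hy
      have hC : pvC t y = 0 := List.count_eq_zero_of_not_mem hy
      have h0 : (t.take q).count y = 0 :=
        List.count_eq_zero_of_not_mem (fun h => hy (List.mem_of_mem_take h))
      omega

-- A's inner loop skips positions that are not candidates
lemma scan_skip (t : List Char) (x : Char) (us : PySem.Set Int) (l1 l2 : List Int)
    (h : ∀ p ∈ l1, ¬ pvPred t x us p) :
    solScan t x us (l1 ++ l2) = solScan t x us l2 := by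
  induction l1 with
  | nil => simp
  | cons p l1 ih =>
    have hp := h p (by simp)
    have hrest : ∀ q ∈ l1, ¬ pvPred t x us q := fun q hq => h q (by simp [hq])
    unfold pvPred at hp
    cases hcb : PySem.Set.contains us p with
    | true =>
      have hm : p ∈ us := (PySem.Set.contains_iff us p).mp hcb
      simpa [solScan, hm] using ih hrest
    | false =>
      have hm : p ∉ us := by
        intro hmem
        rw [(PySem.Set.contains_iff us p).mpr hmem] at hcb
        cases hcb
      have h1 : ¬ (PySem.List.pyGetD t p ' ' = x) := fun hh => hp ⟨hcb, Or.inl hh⟩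
      have h2 : ¬ (PySem.List.pyGetD t p ' ' = ' ') := fun hh => hp ⟨hcb, Or.inr hh⟩
      simpa [solScan, hm, h1, h2] using ih hrest

lemma scan_none (t : List Char) (x : Char) (us : PySem.Set Int) (ps : List Int)
    (h : ∀ p ∈ ps, ¬ pvPred t x us p) : solScan t x us ps = none := by
  have := scan_skip t x us ps [] h
  simpa [solScan] using this

lemma scan_first (t : List Char) (x : Char) (us : PySem.Set Int) (n q : Int)
    (h0 : 0 ≤ q) (hqn : q < n) (hq : pvPred t x us q)
    (hmin : ∀ p : Int, 0 ≤ p → p < q → ¬ pvPred t x us p) :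
    solScan t x us (PySem.List.pyRange 0 n) =
      (if PySem.List.pyGetD t q ' ' = x then some q else none) := by
  rw [PySem.List.pyRange_one_append 0 q n h0 (le_of_lt hqn)]
  rw [scan_skip t x us _ _ (by
    intro p hp
    rw [PySem.List.mem_pyRange_one] at hp
    exact hmin p hp.1 hp.2)]
  rw [PySem.List.pyRange_one_cons hqn]
  rcases hq with ⟨hc, hd⟩
  have hm : q ∉ us := by
    intro hmem
    rw [(PySem.Set.contains_iff us q).mpr hmem] at hc
    cases hc
  by_cases hx : PySem.List.pyGetD t q ' ' = x
  · simp [solScan, hm, hx]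
  · have hsp : PySem.List.pyGetD t q ' ' = ' ' := by tauto
    simp [solScan, hm, hsp]

lemma pv_cnt_le_C (n : Int) (t : List Char) (cnt : Char → Nat)
    (hc : ∀ y, cnt y ≤ pvW n t y) (y : Char) : cnt y ≤ pvC t y :=
  le_trans (hc y) ((List.take_sublist n.toNat t).count_le y)

lemma pv_getD_toNat (t : List Char) (p : Int) (hp0 : 0 ≤ p) (hq : p.toNat < t.length) :
    PySem.List.pyGetD t p ' ' = t[p.toNat]'hq := by
  rw [PySem.List.pyGetD_of_nonneg t ' ' hp0]
  exact List.getD_eq_getElem t ' ' hq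

-- in a block of the shelf, the unused positions are exactly those past the sold counter
lemma pv_unused_iff (n : Int) (t : List Char) (hsh : pvShape t) (cnt : Char → Nat)
    (us : PySem.Set Int)
    (hu : ∀ p : Int, PySem.Set.contains us p = true ↔
      ∃ y, (pvS t y : Int) ≤ p ∧ p < pvS t y + cnt y)
    (hc : ∀ y, cnt y ≤ pvW n t y) (y : Char) (p : Int) (hp0 : 0 ≤ p)
    (hq : p.toNat < t.length)
    (hblk : pvS t y ≤ p.toNat ∧ p.toNat < pvS t y + pvC t y) :
    (PySem.Set.contains us p = false ↔ ((pvS t y + cnt y : Nat) : Int) ≤ p) := by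
  constructor
  · intro hcf
    have hnot : ¬ ∃ z, (pvS t z : Int) ≤ p ∧ p < pvS t z + cnt z := by
      intro hex
      rw [(hu p).mpr hex] at hcf
      cases hcf
    by_contra hlt
    exact hnot ⟨y, by push_cast at hlt ⊢; omega, by push_cast at hlt ⊢; omega⟩
  · intro hge
    cases hcb : PySem.Set.contains us p with
    | false => rfl
    | true =>
      exfalso
      obtain ⟨z, hz1, hz2⟩ := (hu p).mp hcb
      have hcz : cnt z ≤ pvC t z := pv_cnt_le_C n t cnt hc z
      have hblkz : pvS t z ≤ p.toNat ∧ p.toNat < pvS t z + pvC t z := by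
        constructor <;> omega
      have hty : t[p.toNat]'hq = y := (hsh.1 p.toNat hq y).mpr hblk
      have htz : t[p.toNat]'hq = z := (hsh.1 p.toNat hq z).mpr hblkz
      have hzy : z = y := by rw [hty] at htz; exact htz.symm
      subst hzy
      push_cast at hge hz2
      omega

-- candidates of the scan, under the invariant, are exactly the unsold part of x's block
-- and the unsold part of the ' ' block
lemma pv_pred_iff (n : Int) (t : List Char) (hlen : n ≤ (t.length : Int)) (hsh : pvShape t)
    (cnt : Char → Nat) (us : PySem.Set Int)
    (hu : ∀ p : Int, PySem.Set.contains us p = true ↔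
      ∃ y, (pvS t y : Int) ≤ p ∧ p < pvS t y + cnt y)
    (hc : ∀ y, cnt y ≤ pvW n t y) (x : Char) (p : Int) (hp0 : 0 ≤ p) (hpn : p < n) :
    pvPred t x us p ↔
      (((pvS t x + cnt x : Nat) : Int) ≤ p ∧ p < ((pvS t x + pvC t x : Nat) : Int)) ∨
      (((pvS t ' ' + cnt ' ' : Nat) : Int) ≤ p ∧ p < ((pvS t ' ' + pvC t ' ' : Nat) : Int)) := by
  have hq : p.toNat < t.length := by omega
  have hget := pv_getD_toNat t p hp0 hq
  unfold pvPred
  rw [hget]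
  constructor
  · rintro ⟨hcf, hd | hd⟩
    · left
      have hblk := (hsh.1 p.toNat hq x).mp hd
      have h1 := (pv_unused_iff n t hsh cnt us hu hc x p hp0 hq hblk).mp hcf
      refine ⟨h1, ?_⟩
      push_cast
      omega
    · right
      have hblk := (hsh.1 p.toNat hq ' ').mp hd
      have h1 := (pv_unused_iff n t hsh cnt us hu hc ' ' p hp0 hq hblk).mp hcf
      refine ⟨h1, ?_⟩
      push_cast
      omega
  · rintro (⟨hge, hlt⟩ | ⟨hge, hlt⟩)
    · have hcx : cnt x ≤ pvC t x := pv_cnt_le_C n t cnt hc x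
      have hblk : pvS t x ≤ p.toNat ∧ p.toNat < pvS t x + pvC t x := by
        push_cast at hge hlt; omega
      exact ⟨(pv_unused_iff n t hsh cnt us hu hc x p hp0 hq hblk).mpr hge,
        Or.inl ((hsh.1 p.toNat hq x).mpr hblk)⟩
    · have hcx : cnt ' ' ≤ pvC t ' ' := pv_cnt_le_C n t cnt hc ' '
      have hblk : pvS t ' ' ≤ p.toNat ∧ p.toNat < pvS t ' ' + pvC t ' ' := by
        push_cast at hge hlt; omega
      exact ⟨(pv_unused_iff n t hsh cnt us hu hc ' ' p hp0 hq hblk).mpr hge,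
        Or.inr ((hsh.1 p.toNat hq ' ').mpr hblk)⟩

lemma pv_ok_iff (n : Int) (t : List Char) (hlen : n ≤ (t.length : Int)) (hsh : pvShape t)
    (cnt : Char → Nat) (y : Char) :
    cnt y < pvW n t y ↔
      (pvS t y + cnt y < pvS t y + pvC t y ∧ ((pvS t y + cnt y : Nat) : Int) < n) := by
  have hq : n.toNat ≤ t.length := by omega
  rw [pvW, hsh.2.2 y n.toNat hq]
  omega

lemma pv_mem_of_ok (n : Int) (t : List Char) (cnt : Char → Nat) (y : Char)
    (h : cnt y < pvW n t y) : y ∈ t := by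
  have hpos : 0 < pvW n t y := Nat.lt_of_le_of_lt (Nat.zero_le _) h
  rw [pvW] at hpos
  exact List.mem_of_mem_take (List.count_pos_iff.mp hpos)

-- the scan finds exactly the next unsold copy of x, unless an unsold empty slot precedes it
lemma pv_block_pred (n : Int) (t : List Char) (hlen : n ≤ (t.length : Int)) (hsh : pvShape t)
    (cnt : Char → Nat) (us : PySem.Set Int)
    (hu : ∀ p : Int, PySem.Set.contains us p = true ↔
      ∃ y, (pvS t y : Int) ≤ p ∧ p < pvS t y + cnt y)
    (hc : ∀ y, cnt y ≤ pvW n t y) (x y : Char) (hxy : y = x ∨ y = ' ')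
    (hok : cnt y < pvW n t y) :
    pvPred t x us ((pvS t y + cnt y : Nat) : Int) ∧
      PySem.List.pyGetD t ((pvS t y + cnt y : Nat) : Int) ' ' = y := by
  obtain ⟨hb1, hb2⟩ := (pv_ok_iff n t hlen hsh cnt y).mp hok
  have hp0 : (0 : Int) ≤ ((pvS t y + cnt y : Nat) : Int) := by positivity
  have hq : ((pvS t y + cnt y : Nat) : Int).toNat < t.length := by
    have := hsh.2.1 y
    omega
  have hblk : pvS t y ≤ ((pvS t y + cnt y : Nat) : Int).toNat ∧
      ((pvS t y + cnt y : Nat) : Int).toNat < pvS t y + pvC t y := by omega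
  have hget := pv_getD_toNat t _ hp0 hq
  have hty : t[((pvS t y + cnt y : Nat) : Int).toNat]'hq = y := (hsh.1 _ hq y).mpr hblk
  have hgy : PySem.List.pyGetD t ((pvS t y + cnt y : Nat) : Int) ' ' = y := by rw [hget, hty]
  refine ⟨⟨(pv_unused_iff n t hsh cnt us hu hc y _ hp0 hq hblk).mpr le_rfl, ?_⟩, hgy⟩
  rcases hxy with rfl | hsp
  · exact Or.inl hgy
  · exact Or.inr (by rw [hgy, hsp])

lemma pv_step_some (n : Int) (t : List Char) (hlen : n ≤ (t.length : Int)) (hsh : pvShape t)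
    (cnt : Char → Nat) (us : PySem.Set Int)
    (hu : ∀ p : Int, PySem.Set.contains us p = true ↔
      ∃ y, (pvS t y : Int) ≤ p ∧ p < pvS t y + cnt y)
    (hc : ∀ y, cnt y ≤ pvW n t y) (x : Char)
    (hok : cnt x < pvW n t x)
    (hsp : x = ' ' ∨ ¬(cnt ' ' < pvW n t ' ' ∧
      ((pvS t ' ' + cnt ' ' : Nat) : Int) < ((pvS t x + cnt x : Nat) : Int))) :
    solScan t x us (PySem.List.pyRange 0 n) = some ((pvS t x + cnt x : Nat) : Int) := by
  obtain ⟨hb1, hb2⟩ := (pv_ok_iff n t hlen hsh cnt x).mp hok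
  obtain ⟨hpred, hget⟩ :=
    pv_block_pred n t hlen hsh cnt us hu hc x x (Or.inl rfl) hok
  have hres := scan_first t x us n ((pvS t x + cnt x : Nat) : Int) (by positivity) hb2 hpred ?hmin
  · rw [hres, if_pos hget]
  case hmin =>
    intro p hp0 hplt hpred'
    rw [pv_pred_iff n t hlen hsh cnt us hu hc x p hp0 (lt_trans hplt hb2)] at hpred'
    rcases hpred' with ⟨hge, _⟩ | ⟨hge, hlt⟩
    · omega
    · rcases hsp with rfl | hnsp
      · omega
      · have hoksp : cnt ' ' < pvW n t ' ' := by
          rw [pv_ok_iff n t hlen hsh cnt ' ']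
          constructor
          · push_cast at hge hlt ⊢; omega
          · calc ((pvS t ' ' + cnt ' ' : Nat) : Int) ≤ p := hge
              _ < n := lt_trans hplt hb2
        have hnlt : ¬ ((pvS t ' ' + cnt ' ' : Nat) : Int) < ((pvS t x + cnt x : Nat) : Int) :=
          fun hh => hnsp ⟨hoksp, hh⟩
        omega

lemma pv_step_none (n : Int) (t : List Char) (hlen : n ≤ (t.length : Int)) (hsh : pvShape t)
    (cnt : Char → Nat) (us : PySem.Set Int)
    (hu : ∀ p : Int, PySem.Set.contains us p = true ↔
      ∃ y, (pvS t y : Int) ≤ p ∧ p < pvS t y + cnt y)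
    (hc : ∀ y, cnt y ≤ pvW n t y) (x : Char)
    (h : ¬(cnt x < pvW n t x ∧ (x = ' ' ∨ ¬(cnt ' ' < pvW n t ' ' ∧
      ((pvS t ' ' + cnt ' ' : Nat) : Int) < ((pvS t x + cnt x : Nat) : Int))))) :
    solScan t x us (PySem.List.pyRange 0 n) = none := by
  by_cases hok : cnt x < pvW n t x
  · -- an unsold empty slot comes before the next copy of x: the customer leaves
    have hsp : x ≠ ' ' ∧ (cnt ' ' < pvW n t ' ' ∧
        ((pvS t ' ' + cnt ' ' : Nat) : Int) < ((pvS t x + cnt x : Nat) : Int)) := by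
      by_cases hx : x = ' '
      · exact absurd ⟨hok, Or.inl hx⟩ h
      · refine ⟨hx, ?_⟩
        by_contra hh
        exact h ⟨hok, Or.inr hh⟩
    obtain ⟨hxsp, hoksp, hltsp⟩ := hsp
    obtain ⟨hb1, hb2⟩ := (pv_ok_iff n t hlen hsh cnt ' ').mp hoksp
    obtain ⟨hpred, hget⟩ :=
      pv_block_pred n t hlen hsh cnt us hu hc x ' ' (Or.inr rfl) hoksp
    have hres := scan_first t x us n ((pvS t ' ' + cnt ' ' : Nat) : Int) (by positivity) hb2 hpred ?hmin
    · rw [hres, if_neg (by rw [hget]; exact fun hh => hxsp hh.symm)]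
    case hmin =>
      intro p hp0 hplt hpred'
      rw [pv_pred_iff n t hlen hsh cnt us hu hc x p hp0 (lt_trans hplt hb2)] at hpred'
      rcases hpred' with ⟨hge, _⟩ | ⟨hge, _⟩ <;> omega
  · by_cases hoksp : cnt ' ' < pvW n t ' '
    · -- no unsold copy of x among the first n slots, but an unsold empty slot stops the scan
      have hxsp : x ≠ ' ' := by
        intro hh
        subst hh
        exact hok hoksp
      obtain ⟨hb1, hb2⟩ := (pv_ok_iff n t hlen hsh cnt ' ').mp hoksp
      obtain ⟨hpred, hget⟩ :=
        pv_block_pred n t hlen hsh cnt us hu hc x ' ' (Or.inr rfl) hoksp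
      have hres := scan_first t x us n ((pvS t ' ' + cnt ' ' : Nat) : Int) (by positivity) hb2 hpred ?hmin
      · rw [hres, if_neg (by rw [hget]; exact fun hh => hxsp hh.symm)]
      case hmin =>
        intro p hp0 hplt hpred'
        rw [pv_pred_iff n t hlen hsh cnt us hu hc x p hp0 (lt_trans hplt hb2)] at hpred'
        rcases hpred' with ⟨hge, hlt'⟩ | ⟨hge, _⟩
        · exact hok ((pv_ok_iff n t hlen hsh cnt x).mpr
            ⟨by push_cast at hge hlt' ⊢; omega, lt_of_le_of_lt hge (lt_trans hplt hb2)⟩)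
        · omega
    · -- no candidate at all: the scan walks through all n slots and finds nothing
      apply scan_none
      intro p hp
      rw [PySem.List.mem_pyRange_one] at hp
      rw [pv_pred_iff n t hlen hsh cnt us hu hc x p hp.1 hp.2]
      rintro (⟨hge, hlt'⟩ | ⟨hge, hlt'⟩)
      · exact hok ((pv_ok_iff n t hlen hsh cnt x).mpr
          ⟨by push_cast at hge hlt' ⊢; omega, lt_of_le_of_lt hge hp.2⟩)
      · exact hoksp ((pv_ok_iff n t hlen hsh cnt ' ').mpr
          ⟨by push_cast at hge hlt' ⊢; omega, lt_of_le_of_lt hge hp.2⟩)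

-- the used-set invariant survives selling one copy of x
lemma pv_used_step (t : List Char) (cnt : Char → Nat) (us : PySem.Set Int)
    (hu : ∀ p : Int, PySem.Set.contains us p = true ↔
      ∃ y, (pvS t y : Int) ≤ p ∧ p < pvS t y + cnt y) (x : Char) :
    ∀ p : Int, PySem.Set.contains (PySem.Set.add us ((pvS t x + cnt x : Nat) : Int)) p = true ↔
      ∃ y, (pvS t y : Int) ≤ p ∧
        p < pvS t y + (fun z => if z = x then cnt z + 1 else cnt z) y := by
  intro p
  rw [PySem.Set.contains_iff, PySem.Set.mem_add]
  constructor
  · rintro (hmem | rfl)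
    · obtain ⟨y, hy1, hy2⟩ := (hu p).mp ((PySem.Set.contains_iff us p).mpr hmem)
      refine ⟨y, hy1, ?_⟩
      simp only
      split_ifs <;> push_cast <;> push_cast at hy2 <;> omega
    · refine ⟨x, by push_cast; omega, ?_⟩
      simp only [if_pos rfl]
      push_cast
      omega
  · rintro ⟨y, hy1, hy2⟩
    simp only at hy2
    by_cases hyx : y = x
    · subst hyx
      rw [if_pos rfl] at hy2
      by_cases hpq : p = ((pvS t y + cnt y : Nat) : Int)
      · right; exact hpq
      · left
        rw [← PySem.Set.contains_iff, hu p]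
        refine ⟨y, hy1, ?_⟩
        push_cast at hy2 hpq ⊢
        omega
    · rw [if_neg hyx] at hy2
      left
      rw [← PySem.Set.contains_iff, hu p]
      exact ⟨y, hy1, hy2⟩

-- the second accumulator of B's shelf pass counts plain characters (the indices are unused)
lemma pv_enum_count (sh : List Char) : ∀ (i0 : Int) (d : PySem.Dict Char Int),
    (PySem.List.enumerate sh i0).foldl
      (fun d ich => d.insert ich.2 (d.getD ich.2 0 + 1)) d =
      sh.foldl (fun d ch => d.insert ch (d.getD ch 0 + 1)) d := by
  induction sh with
  | nil => intro i0 d; rfl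
  | cons a sh ih =>
    intro i0 d
    rw [PySem.List.enumerate_cons, List.foldl_cons, List.foldl_cons, ih]

-- B's first dict (setdefault pass) holds the first index of each product
lemma pv_first_get (t : List Char) (y : Char) : ∀ (i0 : Int) (d : PySem.Dict Char Int),
    ((PySem.List.enumerate t i0).foldl (fun d ich => d.setdefault ich.2 ich.1) d).get? y =
      (if d.contains y then d.get? y else if y ∈ t then some (i0 + pvS t y) else none) := by
  induction t with
  | nil =>
    intro i0 d
    simp only [PySem.List.enumerate, List.foldl_nil, List.not_mem_nil, if_false]
    split_ifs with hdy
    · rfl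
    · exact (PySem.Dict.get?_eq_none_iff_contains d y).mpr (by simpa using hdy)
  | cons a t ih =>
    intro i0 d
    rw [PySem.List.enumerate_cons, List.foldl_cons]
    simp only []
    cases hda : d.contains a with
    | true =>
      rw [PySem.Dict.setdefault_of_contains d i0 hda, ih]
      by_cases hdy : d.contains y
      · simp [hdy]
      · have hay : a ≠ y := fun h => hdy (h ▸ hda)
        have hS : pvS (a :: t) y = pvS t y + 1 := by
          simp [pvS, bne, hay]
        rw [if_neg hdy, hS]
        simp only [List.mem_cons]
        have hya : ¬ y = a := fun h => hay h.symm
        simp only [hya, false_or]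
        split_ifs with hyt
        · congr 1
          push_cast
          ring
        · rfl
    | false =>
      rw [PySem.Dict.setdefault_of_not_contains d i0 hda, ih]
      by_cases hya : y = a
      · subst hya
        have hcont : (d.insert y i0).contains y = true := by
          rw [PySem.Dict.contains_insert]
          simp
        rw [if_pos hcont, PySem.Dict.get?_insert, if_pos rfl]
        have hS : pvS (y :: t) y = 0 := by simp [pvS]
        rw [if_neg (by simp [hda]), if_pos List.mem_cons_self, hS]
        simp
      · have hbeq : (y == a) = false := beq_eq_false_iff_ne.mpr hya
        have hcont : (d.insert a i0).contains y = d.contains y := by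
          rw [PySem.Dict.contains_insert, hbeq, Bool.false_or]
        rw [hcont]
        by_cases hdy : d.contains y
        · rw [if_pos hdy, if_pos hdy, PySem.Dict.get?_insert, if_neg hya]
        · have hay : a ≠ y := fun h => hya (Eq.symm h)
          have hS : pvS (a :: t) y = pvS t y + 1 := by
            simp [pvS, bne, hay]
          rw [if_neg hdy, if_neg hdy, hS]
          simp only [List.mem_cons, hya, false_or]
          split_ifs with hyt
          · congr 1
            push_cast
            ring
          · rfl

-- a first index inside a prefix is the first index in the whole list
lemma pvS_take (t : List Char) (y : Char) : ∀ k, y ∈ t.take k → pvS (t.take k) y = pvS t y := by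
  induction t with
  | nil => intro k h; simp at h
  | cons a t ih =>
    intro k h
    cases k with
    | zero => simp at h
    | succ k =>
      rw [List.take_succ_cons] at h ⊢
      by_cases hay : a = y
      · subst hay
        simp [pvS]
      · have hyt : y ∈ t.take k := by
          rcases List.mem_cons.mp h with h' | h'
          · exact absurd h'.symm hay
          · exact h'
        have h1 : pvS (a :: t.take k) y = pvS (t.take k) y + 1 := by
          simp [pvS, bne, hay]
        have h2 : pvS (a :: t) y = pvS t y + 1 := by
          simp [pvS, bne, hay]
        rw [h1, h2, ih k hyt]

lemma pv_pyRange_nonpos (n : Int) (h : n ≤ 0) : PySem.List.pyRange 0 n = [] := by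
  simp [PySem.List.pyRange, not_lt.mpr h]

-- B's index loop over range(n) visits exactly the enumerated first-n prefix of the shelf
lemma pv_range_enum (t : List Char) (n : Int) (hlen : n ≤ (t.length : Int)) :
    (PySem.List.pyRange 0 n).map (fun i => (i, PySem.List.pyGetD t i ' ')) =
      PySem.List.enumerate (t.take n.toNat) 0 := by
  rcases le_or_gt n 0 with hn | hn
  · rw [pv_pyRange_nonpos n hn]
    have h0 : n.toNat = 0 := by omega
    simp [h0, PySem.List.enumerate]
  · have hTlen : (t.take n.toNat).length = n.toNat := by
      rw [List.length_take]
      omega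
    rw [PySem.List.enumerate_eq_map_pyRange (t.take n.toNat) ' ']
    have hlenT : PySem.List.len (t.take n.toNat) = n := by
      rw [PySem.List.len_eq, hTlen]
      omega
    rw [hlenT]
    apply List.map_congr_left
    intro i hi
    rw [PySem.List.mem_pyRange_one] at hi
    have hi0 : (0 : Int) ≤ i := hi.1
    have hit : i.toNat < t.length := by omega
    have hitk : i.toNat < (t.take n.toNat).length := by rw [hTlen]; omega
    have hg : PySem.List.pyGetD (t.take n.toNat) i ' ' = PySem.List.pyGetD t i ' ' := by
      rw [PySem.List.pyGetD_of_nonneg _ _ hi0, PySem.List.pyGetD_of_nonneg _ _ hi0]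
      rw [List.getD_eq_getElem _ _ hitk, List.getD_eq_getElem _ _ hit]
      exact List.getElem_take
    rw [hg]

-- the two per-customer loop bodies agree, given the invariant (main loop lemma)
lemma pv_loop (n : Int) (t : List Char) (hlen : n ≤ (t.length : Int)) (hsh : pvShape t)
    (first count : PySem.Dict Char Int)
    (hcnt : ∀ y, count.getD y 0 = (pvW n t y : Int))
    (hfst : ∀ y, 0 < pvW n t y → first.getD y 0 = (pvS t y : Int)) :
    ∀ (cs : List Char) (sold : Int) (us : PySem.Set Int) (taken : PySem.Dict Char Int)
      (cnt : Char → Nat),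
      (∀ y, taken.getD y 0 = (cnt y : Int)) →
      (∀ p : Int, PySem.Set.contains us p = true ↔
        ∃ y, (pvS t y : Int) ≤ p ∧ p < pvS t y + cnt y) →
      (∀ y, cnt y ≤ pvW n t y) →
      (cs.foldl
        (fun (st : Int × PySem.Set Int) ci =>
          match solScan t ci st.2 (PySem.List.pyRange 0 n) with
          | some p => (st.1 + 1, PySem.Set.add st.2 p)
          | none => st) (sold, us)).1 =
      (cs.foldl
        (fun (st : Int × PySem.Dict Char Int) x =>
          if count.getD x 0 ≤ st.2.getD x 0 then st
          else
            let pos := first.getD x 0 + st.2.getD x 0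
            if st.2.getD ' ' 0 < count.getD ' ' 0 ∧ first.getD ' ' 0 + st.2.getD ' ' 0 < pos
            then st
            else (st.1 + 1, st.2.insert x (st.2.getD x 0 + 1))) (sold, taken)).1 := by
  intro cs
  induction cs with
  | nil => intro sold us taken cnt _ _ _; rfl
  | cons x cs ih =>
    intro sold us taken cnt htaken hu hc
    rw [List.foldl_cons, List.foldl_cons]
    by_cases hok : cnt x < pvW n t x
    · -- a copy of x remains on the reachable shelf
      have hwx : 0 < pvW n t x := Nat.lt_of_le_of_lt (Nat.zero_le _) hok
      have hBc1 : ¬ count.getD x 0 ≤ taken.getD x 0 := by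
        rw [hcnt x, htaken x]
        exact not_le_of_gt (by exact_mod_cast hok)
      have hBiff : (taken.getD ' ' 0 < count.getD ' ' 0 ∧
          first.getD ' ' 0 + taken.getD ' ' 0 < first.getD x 0 + taken.getD x 0) ↔
          (cnt ' ' < pvW n t ' ' ∧
            ((pvS t ' ' + cnt ' ' : Nat) : Int) < ((pvS t x + cnt x : Nat) : Int)) := by
        rw [htaken ' ', hcnt ' ', htaken x]
        constructor
        · rintro ⟨h1, h2⟩
          have hw : cnt ' ' < pvW n t ' ' := by exact_mod_cast h1
          rw [hfst ' ' (Nat.lt_of_le_of_lt (Nat.zero_le _) hw), hfst x hwx] at h2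
          refine ⟨hw, ?_⟩
          push_cast at h2 ⊢
          omega
        · rintro ⟨h1, h2⟩
          refine ⟨by exact_mod_cast h1, ?_⟩
          rw [hfst ' ' (Nat.lt_of_le_of_lt (Nat.zero_le _) h1), hfst x hwx]
          push_cast at h2 ⊢
          omega
      by_cases hP : cnt ' ' < pvW n t ' ' ∧
          ((pvS t ' ' + cnt ' ' : Nat) : Int) < ((pvS t x + cnt x : Nat) : Int)
      · -- a remaining empty slot stops the customer first: no sale on either side
        have hxsp : x ≠ ' ' := by
          rintro rfl
          exact absurd hP.2 (lt_irrefl _)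
        have hA := pv_step_none n t hlen hsh cnt us hu hc x (by
          rintro ⟨_, h | h⟩
          · exact hxsp h
          · exact h hP)
        rw [hA]
        simp only [if_neg hBc1, if_pos (hBiff.mpr hP)]
        exact ih sold us taken cnt htaken hu hc
      · -- a sale happens on both sides
        have hA := pv_step_some n t hlen hsh cnt us hu hc x hok (Or.inr hP)
        rw [hA]
        simp only [if_neg hBc1, if_neg (fun h => hP (hBiff.mp h))]
        have htaken' : ∀ y, (taken.insert x (taken.getD x 0 + 1)).getD y 0 =
            (((fun z => if z = x then cnt z + 1 else cnt z) y : Nat) : Int) := by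
          intro y
          simp only [PySem.Dict.getD_insert]
          by_cases hyx : y = x
          · subst hyx
            simp only [if_pos rfl, htaken y]
            push_cast
            ring
          · simp only [if_neg hyx, htaken y]
        exact ih (sold + 1) _ _ (fun z => if z = x then cnt z + 1 else cnt z)
          htaken'
          (pv_used_step t cnt us hu x)
          (by
            intro y
            show (if y = x then cnt y + 1 else cnt y) ≤ pvW n t y
            by_cases hyx : y = x
            · rw [if_pos hyx, hyx]; omega
            · rw [if_neg hyx]; exact hc y)
    · -- no copy of x within the first n slots: no sale on either side
      have hA := pv_step_none n t hlen hsh cnt us hu hc x (fun hh => hok hh.1)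
      have hBc1 : count.getD x 0 ≤ taken.getD x 0 := by
        rw [hcnt x, htaken x]
        exact_mod_cast Nat.le_of_not_lt hok
      rw [hA]
      simp only [if_pos hBc1]
      exact ih sold us taken cnt htaken hu hc

-- ===== VERDICT (by name: the statement is the Claim_ definition above) =====
theorem solution_spec : Claim_equal_solution := by
  unfold Claim_equal_solution Spec_solution
  intro n m s c hdom hpre
  have hns : n ≤ PySem.Str.len s := hpre
  have hn : n ≤ (s.toList.length : Int) := by
    rw [PySem.Str.len_eq] at hns; exact hns
  simp only [solution, solution_alt]
  set W : PySem.Dict Char Int :=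
    c.toList.foldl (fun d ch => d.insert ch (d.getD ch 0 + 1)) PySem.Dict.empty with hW
  set t : List Char :=
    PySem.List.sorted2 s.toList (fun x => -(W.getD x 0)) (fun x => x) false with ht
  have htlen : t.length = s.toList.length :=
    (PySem.List.sorted2_perm s.toList (fun x => -(W.getD x 0)) (fun x => x) false).length_eq
  have hlen : n ≤ (t.length : Int) := by rw [htlen]; exact hn
  have hts : t = PySem.List.sorted s.toList (fun z => toLex (-(W.getD z 0), z)) false :=
    pv_sorted2_eq_sorted s.toList (fun x => -(W.getD x 0))
  have hinj : Function.Injective (fun z : Char => toLex (-(W.getD z 0), z)) := by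
    intro a b h
    exact congrArg (fun p : Lex (Int × Char) => (ofLex p).2) h
  have hpair : t.Pairwise (fun a b =>
      (fun z : Char => toLex (-(W.getD z 0), z)) a ≤
      (fun z : Char => toLex (-(W.getD z 0), z)) b) := by
    rw [hts]
    exact PySem.List.sorted_pairwise s.toList (fun z => toLex (-(W.getD z 0), z))
  have hsh : pvShape t := pvShape_of_pairwise t _ hinj hpair
  have hrange : (PySem.List.pyRange 0 n).foldl
      (fun (fc : PySem.Dict Char Int × PySem.Dict Char Int) i =>
        (fc.1.setdefault (PySem.List.pyGetD t i ' ') i,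
         fc.2.insert (PySem.List.pyGetD t i ' ') (fc.2.getD (PySem.List.pyGetD t i ' ') 0 + 1)))
      (PySem.Dict.empty, PySem.Dict.empty) =
      (PySem.List.enumerate (t.take n.toNat) 0).foldl
      (fun (fc : PySem.Dict Char Int × PySem.Dict Char Int) ich =>
        (fc.1.setdefault ich.2 ich.1, fc.2.insert ich.2 (fc.2.getD ich.2 0 + 1)))
      (PySem.Dict.empty, PySem.Dict.empty) := by
    rw [← pv_range_enum t n hlen, List.foldl_map]
  rw [hrange]
  rw [PySem.List.foldl_prod_mk
    (f := fun d (ich : Int × Char) => PySem.Dict.setdefault d ich.2 ich.1)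
    (g := fun d (ich : Int × Char) => PySem.Dict.insert d ich.2 (d.getD ich.2 0 + 1))]
  have hcnt : ∀ y, ((PySem.List.enumerate (t.take n.toNat) 0).foldl
      (fun d ich => d.insert ich.2 (d.getD ich.2 0 + 1)) PySem.Dict.empty).getD y 0 =
      (pvW n t y : Int) := by
    intro y
    rw [pv_enum_count, PySem.Dict.getD_foldl_insert_add_one]
    simp [PySem.Dict.getD_empty, pvW]
  have hfst : ∀ y, 0 < pvW n t y →
      ((PySem.List.enumerate (t.take n.toNat) 0).foldl
        (fun d ich => d.setdefault ich.2 ich.1) PySem.Dict.empty).getD y 0 =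
      (pvS t y : Int) := by
    intro y hy
    have hmem : y ∈ t.take n.toNat := by
      rw [pvW] at hy
      exact List.count_pos_iff.mp hy
    rw [PySem.Dict.getD_eq_get?_getD, pv_first_get]
    rw [if_neg (by simp [PySem.Dict.contains_empty]), if_pos hmem]
    simp [pvS_take t y n.toNat hmem]
  have hu0 : ∀ p : Int, PySem.Set.contains (PySem.Set.empty : PySem.Set Int) p = true ↔
      ∃ y, (pvS t y : Int) ≤ p ∧ p < pvS t y + ((fun _ : Char => (0 : Nat)) y : Nat) := by
    intro p
    constructor
    · intro h
      rw [PySem.Set.contains_iff] at h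
      simp [PySem.Set.empty] at h
    · rintro ⟨y, h1, h2⟩
      exfalso
      simp at h2
      omega
  exact pv_loop n t hlen hsh _ _ hcnt hfst c.toList 0 PySem.Set.empty PySem.Dict.empty
    (fun _ => 0) (fun y => by simp [PySem.Dict.getD_empty]) hu0 (fun y => Nat.zero_le _)
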